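-- pv_equiv track=rewrite | github.com/WeymannC/aoc2025 | 3.py | largest_joltage
-- ===== SOURCE A (Python) =====
-- def largest_joltage(bank: list[int], number_of_batteries: int, current_total: int = 0) -> int:
--     if number_of_batteries > len(bank):
--         raise ValueError("Bank too small")
--     if number_of_batteries == 1:
--         current_total += max(bank)
--         return current_total
--     next_value = max(bank[:1-number_of_batteries])
--     next_battery = bank.index(next_value)
--     current_total += next_value*10**(number_of_batteries-1)
--     return largest_joltage(bank[next_battery+1:], number_of_batteries-1, current_total)
-- ===== SOURCE B (Python) =====
-- def largest_joltage(bank: list[int], number_of_batteries: int, current_total: int = 0) -> int: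
--     # One-pass monotonic stack: keep the lexicographically largest length-k subsequence.
--     n = len(bank)
--     if number_of_batteries > n:
--         raise ValueError("Bank too small")
--     drops = n - number_of_batteries
--     stack = []
--     for x in bank:
--         while drops and stack and stack[-1] < x:
--             stack.pop()
--             drops -= 1
--         stack.append(x)
--     acc = 0
--     for x in stack[:number_of_batteries]:
--         acc = acc * 10 + x
--     return current_total + acc
-- ===== Notes on version B (the rewrite author's own statement) =====
-- stated objective: faster
-- what changed: Replaced the O(n*k) recursive greedy (recompute max of a window and re-slice the list at every level) by a single-pass monotonic-stack selection of the same length-k subsequence followed by a Horner evaluation.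
import Mathlib
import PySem

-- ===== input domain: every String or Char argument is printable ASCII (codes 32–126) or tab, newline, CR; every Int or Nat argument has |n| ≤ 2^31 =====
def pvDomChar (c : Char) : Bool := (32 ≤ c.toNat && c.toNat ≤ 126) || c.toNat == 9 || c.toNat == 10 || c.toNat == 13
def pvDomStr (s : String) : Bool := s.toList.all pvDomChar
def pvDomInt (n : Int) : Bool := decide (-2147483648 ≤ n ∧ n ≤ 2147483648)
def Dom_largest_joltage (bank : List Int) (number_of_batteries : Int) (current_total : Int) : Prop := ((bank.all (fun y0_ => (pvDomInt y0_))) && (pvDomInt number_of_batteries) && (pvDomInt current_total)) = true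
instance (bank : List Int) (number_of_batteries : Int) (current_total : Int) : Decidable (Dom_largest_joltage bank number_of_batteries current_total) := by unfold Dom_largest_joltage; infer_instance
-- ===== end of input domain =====

-- B replaces A's recursive greedy (repeated max over a window, O(n·k)) by a one-pass
-- monotonic-stack selection of the same length-k subsequence, O(n).

-- ===== PORT A =====
-- Needed by the port's decreasing_by below (cited by name there).
theorem pvIdxLt {bank : List Int} {v : Int} {i : Nat}
    (h : PySem.List.index? bank v = some i) : i < bank.length := by
  obtain ⟨hk, -, -⟩ := PySem.List.getElem_of_index?_eq_some h
  exact hk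

def largest_joltage (bank : List Int) (number_of_batteries : Int) (current_total : Int) : Int :=
  if number_of_batteries > (bank.length : Int) then 0  -- Python: raise ValueError (outside Pre_)
  else if number_of_batteries = 1 then
    match PySem.List.max? bank (fun y => y) with
    | some m => current_total + m
    | none => 0  -- Python: max([]) raises (unreachable under Pre_)
  else
    match PySem.List.max? (PySem.List.slice bank none (some (1 - number_of_batteries))) (fun y => y) with
    | none => 0  -- Python: max([]) raises (unreachable under Pre_)
    | some v =>
      match h : PySem.List.index? bank v with
      | none => 0  -- unreachable: v ∈ bank
      | some i =>
        largest_joltage (bank.drop (i+1)) (number_of_batteries - 1)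
          (current_total + v * 10 ^ (number_of_batteries - 1).toNat)
termination_by bank.length
decreasing_by
  have := pvIdxLt h
  simp only [List.length_drop]
  omega

-- ===== PORT B =====
-- the `while drops and stack and stack[-1] < x` loop (stack kept top-first)
def pvPop (x : Int) : List Int → Int → List Int × Int
  | [], d => ([], d)
  | t :: s, d => if d ≠ 0 ∧ t < x then pvPop x s (d - 1) else (t :: s, d)

-- the `for x in bank` loop over state (stack, drops)
def pvRun (bank : List Int) (s : List Int) (d : Int) : List Int × Int :=
  bank.foldl (fun p x => ((x :: (pvPop x p.1 p.2).1), (pvPop x p.1 p.2).2)) (s, d)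

def largest_joltage_alt (bank : List Int) (number_of_batteries : Int) (current_total : Int) : Int :=
  if number_of_batteries > (bank.length : Int) then 0  -- raise ValueError (outside Pre_)
  else
    let st := (pvRun bank [] ((bank.length : Int) - number_of_batteries)).1
    let sel := PySem.List.slice st.reverse none (some number_of_batteries)   -- stack[:k], bottom-first
    current_total + sel.foldl (fun a x => a * 10 + x) 0

-- ===== PRECONDITION & SPEC =====
-- Pre_ excludes exactly the inputs where Python A raises: k > len(bank) (explicit ValueError)
-- and k ≤ 0 (A eventually calls max([]) — ValueError).
def Pre_largest_joltage (bank : List Int) (number_of_batteries : Int) (current_total : Int) : Prop :=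
  1 ≤ number_of_batteries ∧ number_of_batteries ≤ (bank.length : Int)
instance (bank : List Int) (number_of_batteries : Int) (current_total : Int) : Decidable (Pre_largest_joltage bank number_of_batteries current_total) := by unfold Pre_largest_joltage; infer_instance

def pvWitness_largest_joltage : List Int × Int × Int := ([3, 1, 4, 1, 5], 3, 2)

def Spec_largest_joltage (bank : List Int) (number_of_batteries : Int) (current_total : Int) (out : Int) : Prop := out = largest_joltage_alt bank number_of_batteries current_total
instance (bank : List Int) (number_of_batteries : Int) (current_total : Int) (out : Int) : Decidable (Spec_largest_joltage bank number_of_batteries current_total out) := by unfold Spec_largest_joltage; infer_instance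

-- ===== CLAIM (what is proved, stated in full; the proofs are below) =====
def Claim_equal_largest_joltage : Prop := ∀ (bank : List Int) (number_of_batteries : Int) (current_total : Int), Dom_largest_joltage bank number_of_batteries current_total → Pre_largest_joltage bank number_of_batteries current_total → Spec_largest_joltage bank number_of_batteries current_total (largest_joltage bank number_of_batteries current_total)


-- ===== LEMMAS AND PROOFS =====

-- proof-only abbreviations
def pvSel (bank : List Int) (kt : Nat) : List Int :=
  ((pvRun bank [] ((bank.length : Int) - (kt : Int))).1.reverse).take kt

def pvHorner (l : List Int) : Int := l.foldl (fun a x => a * 10 + x) 0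

-- stack/budget bookkeeping for pvPop / pvRun
theorem pvPop_inv (x : Int) (s : List Int) (d : Int) :
    (pvPop x s d).2 + (s.length : Int) = d + ((pvPop x s d).1.length : Int) := by
  induction s generalizing d with
  | nil => simp [pvPop]
  | cons t s ih =>
    by_cases h : d ≠ 0 ∧ t < x
    · simp only [pvPop, if_pos h, List.length_cons]
      have := ih (d - 1); push_cast at this ⊢; omega
    · simp [pvPop, if_neg h]

theorem pvPop_sub {x : Int} {s : List Int} {d : Int} {a : Int}
    (h : a ∈ (pvPop x s d).1) : a ∈ s := by
  induction s generalizing d with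
  | nil => simpa [pvPop] using h
  | cons t s ih =>
    by_cases hlt : d ≠ 0 ∧ t < x
    · simp only [pvPop, if_pos hlt] at h
      exact List.mem_cons_of_mem _ (ih h)
    · simpa [pvPop, if_neg hlt] using h

theorem pvPop_nonneg {x : Int} {s : List Int} {d : Int} (hd : 0 ≤ d) :
    0 ≤ (pvPop x s d).2 := by
  induction s generalizing d with
  | nil => simpa [pvPop] using hd
  | cons t s ih =>
    by_cases h : d ≠ 0 ∧ t < x
    · simp only [pvPop, if_pos h]
      exact ih (by omega)
    · simpa [pvPop, if_neg h] using hd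

theorem pvPop_all {x : Int} {s : List Int} {d : Int}
    (h : ∀ a ∈ s, a < x) (hd : (s.length : Int) ≤ d) :
    pvPop x s d = ([], d - s.length) := by
  induction s generalizing d with
  | nil => simp [pvPop]
  | cons t s ih =>
    have ht : t < x := h t (by simp)
    have hg : d ≠ 0 ∧ t < x := by
      refine ⟨?_, ht⟩
      simp only [List.length_cons] at hd; push_cast at hd; omega
    simp only [pvPop, if_pos hg]
    rw [ih (fun a ha => h a (List.mem_cons_of_mem _ ha))
      (by simp only [List.length_cons] at hd; push_cast at hd ⊢; omega)]
    simp only [List.length_cons]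
    push_cast
    ring_nf

theorem pvPop_bot {x v : Int} {s : List Int} {d : Int}
    (h : v < x → d ≤ (s.length : Int)) (hd : 0 ≤ d) :
    pvPop x (s ++ [v]) d = ((pvPop x s d).1 ++ [v], (pvPop x s d).2) := by
  induction s generalizing d with
  | nil =>
    have hg : ¬ (d ≠ 0 ∧ v < x) := by
      rintro ⟨hd0, hvx⟩
      have := h hvx; simp at this; omega
    simp [pvPop, if_neg hg]
  | cons t s ih =>
    by_cases hg : d ≠ 0 ∧ t < x
    · simp only [List.cons_append, pvPop, if_pos hg]
      exact ih (fun hvx => by have := h hvx; simp at this ⊢; omega) (by omega)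
    · simp [pvPop, if_neg hg]

theorem pvRun_cons (x : Int) (ys : List Int) (s : List Int) (d : Int) :
    pvRun (x :: ys) s d = pvRun ys (x :: (pvPop x s d).1) (pvPop x s d).2 := rfl

theorem pvRun_append (ys zs : List Int) (s : List Int) (d : Int) :
    pvRun (ys ++ zs) s d = pvRun zs (pvRun ys s d).1 (pvRun ys s d).2 := by
  simp [pvRun, List.foldl_append]

theorem pvRun_inv (ys : List Int) (s : List Int) (d : Int) :
    (pvRun ys s d).2 + (s.length : Int) + (ys.length : Int)
      = d + ((pvRun ys s d).1.length : Int) := by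
  induction ys generalizing s d with
  | nil => simp [pvRun]
  | cons x ys ih =>
    rw [pvRun_cons]
    have h1 := pvPop_inv x s d
    have h2 := ih (x :: (pvPop x s d).1) (pvPop x s d).2
    simp only [List.length_cons] at *
    push_cast at *
    omega

theorem pvRun_mem {ys s : List Int} {d : Int} {a : Int}
    (h : a ∈ (pvRun ys s d).1) : a ∈ s ∨ a ∈ ys := by
  induction ys generalizing s d with
  | nil => exact Or.inl (by simpa [pvRun] using h)
  | cons x ys ih =>
    rw [pvRun_cons] at h
    rcases ih h with h' | h'
    · rcases List.mem_cons.mp h' with rfl | h''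
      · exact Or.inr (by simp)
      · exact Or.inl (pvPop_sub h'')
    · exact Or.inr (List.mem_cons_of_mem _ h')

theorem pvRun_nonneg {ys s : List Int} {d : Int} (hd : 0 ≤ d) :
    0 ≤ (pvRun ys s d).2 := by
  induction ys generalizing s d with
  | nil => simpa [pvRun] using hd
  | cons x ys ih =>
    rw [pvRun_cons]
    exact ih (pvPop_nonneg hd)

theorem pvRun_bot {v : Int} (ys : List Int) (s : List Int) (d : Int)
    (h : ∀ r (hr : r < ys.length), (r : Int) + (s.length : Int) < d → ys[r] ≤ v)
    (hd : 0 ≤ d) :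
    pvRun ys (s ++ [v]) d = ((pvRun ys s d).1 ++ [v], (pvRun ys s d).2) := by
  induction ys generalizing s d with
  | nil => simp [pvRun]
  | cons x ys ih =>
    have hb : v < x → d ≤ (s.length : Int) := by
      intro hvx
      by_contra hnd
      have := h 0 (by simp) (by push_cast; omega)
      simp at this; omega
    rw [pvRun_cons x ys (s ++ [v]) d, pvRun_cons x ys s d, pvPop_bot hb hd]
    have heq : (x :: ((pvPop x s d).1 ++ [v])) = (x :: (pvPop x s d).1) ++ [v] := by simp
    rw [heq, ih]
    · intro r hr hlt
      have hinv := pvPop_inv x s d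
      have := h (r + 1) (by simpa using Nat.succ_lt_succ hr)
        (by simp only [List.length_cons] at hlt; push_cast at hlt hinv ⊢; omega)
      simpa using this
    · exact pvPop_nonneg hd

theorem pvSel_len {bank : List Int} {kt : Nat} (h1 : 1 ≤ kt) (h2 : kt ≤ bank.length) :
    (pvSel bank kt).length = kt := by
  have hinv := pvRun_inv bank [] ((bank.length : Int) - (kt : Int))
  have hnn := pvRun_nonneg (ys := bank) (s := []) (d := (bank.length : Int) - (kt : Int)) (by omega)
  simp only [List.length_nil] at hinv
  simp only [pvSel, List.length_take, List.length_reverse]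
  omega

theorem pvHorner_shift (l : List Int) (a : Int) :
    l.foldl (fun a x => a * 10 + x) a = a * 10 ^ l.length + pvHorner l := by
  induction l generalizing a with
  | nil => simp [pvHorner]
  | cons x l ih =>
    simp only [List.foldl_cons, pvHorner, List.length_cons]
    rw [ih (a * 10 + x), show (0 : Int) * 10 + x = x from by ring, ih x]
    ring

theorem pvHorner_cons (x : Int) (l : List Int) :
    pvHorner (x :: l) = x * 10 ^ l.length + pvHorner l := by
  simp only [pvHorner, List.foldl_cons]
  rw [show (0 : Int) * 10 + x = x from by ring, pvHorner_shift]
  rfl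

-- the greedy step: the stack selection starts with the first maximum of the window
theorem pvSel_step {bank : List Int} {kt : Nat} {v : Int} {i : Nat}
    (h1 : 1 ≤ kt) (h2 : kt ≤ bank.length)
    (hv : PySem.List.max? (bank.take (bank.length - (kt - 1))) (fun y => y) = some v)
    (hi : PySem.List.index? bank v = some i) :
    pvSel bank kt = v :: pvSel (bank.drop (i + 1)) (kt - 1) ∧ i ≤ bank.length - kt := by
  obtain ⟨pre, suf, hbank, hlen, hnot⟩ := (PySem.List.index?_eq_some_iff bank v i).mp hi
  subst hbank
  have hL : (pre ++ v :: suf).length = i + 1 + suf.length := by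
    simp only [List.length_append, List.length_cons, hlen]; omega
  have hvmem : v ∈ (pre ++ v :: suf).take ((pre ++ v :: suf).length - (kt - 1)) :=
    PySem.List.max?_mem hv
  have hmax : ∀ y ∈ (pre ++ v :: suf).take ((pre ++ v :: suf).length - (kt - 1)), y ≤ v :=
    fun y hy => PySem.List.max?_isMax hv y hy
  have him : i < (pre ++ v :: suf).length - (kt - 1) := by
    by_contra hge
    refine hnot ?_
    have htp : (pre ++ v :: suf).take ((pre ++ v :: suf).length - (kt - 1))
        = pre.take ((pre ++ v :: suf).length - (kt - 1)) := by
      rw [List.take_append_of_le_length (by omega)]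
    exact List.take_subset _ pre (by rwa [htp] at hvmem)
  have htakem : (pre ++ v :: suf).take ((pre ++ v :: suf).length - (kt - 1))
      = pre ++ v :: suf.take ((pre ++ v :: suf).length - kt - i) := by
    rw [List.take_append, List.take_of_length_le (by omega), hlen,
      show (pre ++ v :: suf).length - (kt - 1) - i = ((pre ++ v :: suf).length - kt - i) + 1
        from by omega,
      List.take_succ_cons]
  have hpre : ∀ a ∈ pre, a < v := by
    intro a ha
    have hain : a ∈ (pre ++ v :: suf).take ((pre ++ v :: suf).length - (kt - 1)) := by
      rw [htakem]; exact List.mem_append_left _ ha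
    exact lt_of_le_of_ne (hmax a hain) (fun he => hnot (he ▸ ha))
  have hsuf : ∀ r (hr : r < suf.length),
      (r : Int) + ((0 : Nat) : Int) < (((pre ++ v :: suf).length : Nat) : Int) - (kt : Int) - (i : Int) → suf[r] ≤ v := by
    intro r hr hrd
    apply hmax
    rw [htakem]
    refine List.mem_append_right _ (List.mem_cons_of_mem _ ?_)
    have hr' : r < (suf.take ((pre ++ v :: suf).length - kt - i)).length := by
      simp only [List.length_take]
      push_cast at hrd
      omega
    have hmem := List.getElem_mem hr'
    rwa [List.getElem_take] at hmem
  have hdrop : (pre ++ v :: suf).drop (i + 1) = suf := by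
    rw [show i + 1 = pre.length + 1 from by omega]
    simp [List.drop_append]
  have hrunsplit : pvRun (pre ++ v :: suf) [] ((((pre ++ v :: suf).length : Nat) : Int) - (kt : Int))
      = ((pvRun suf [] ((((pre ++ v :: suf).length : Nat) : Int) - (kt : Int) - (i : Int))).1 ++ [v],
         (pvRun suf [] ((((pre ++ v :: suf).length : Nat) : Int) - (kt : Int) - (i : Int))).2) := by
    rw [pvRun_append pre (v :: suf)]
    have hinv := pvRun_inv pre [] ((((pre ++ v :: suf).length : Nat) : Int) - (kt : Int))
    simp only [List.length_nil, Nat.add_zero, Nat.cast_zero, hlen] at hinv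
    have hs1v : ∀ a ∈ (pvRun pre [] ((((pre ++ v :: suf).length : Nat) : Int) - (kt : Int))).1, a < v := by
      intro a ha
      rcases pvRun_mem ha with h' | h'
      · simp at h'
      · exact hpre a h'
    rw [pvRun_cons, pvPop_all hs1v (by omega)]
    simp only
    rw [show (pvRun pre [] ((((pre ++ v :: suf).length : Nat) : Int) - (kt : Int))).2
          - ((pvRun pre [] ((((pre ++ v :: suf).length : Nat) : Int) - (kt : Int))).1.length : Int)
        = (((pre ++ v :: suf).length : Nat) : Int) - (kt : Int) - (i : Int) from by omega,
      show (v :: ([] : List Int)) = ([] : List Int) ++ [v] from rfl]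
    exact pvRun_bot suf [] _ hsuf (by omega)
  refine ⟨?_, by omega⟩
  have hsel : pvSel (pre ++ v :: suf) kt
      = v :: ((pvRun suf [] ((((pre ++ v :: suf).length : Nat) : Int) - (kt : Int) - (i : Int))).1.reverse).take (kt - 1) := by
    unfold pvSel
    rw [hrunsplit]
    simp only [List.reverse_append, List.reverse_cons, List.reverse_nil, List.nil_append,
      List.singleton_append]
    obtain ⟨kt', rfl⟩ : ∃ kt', kt = kt' + 1 := ⟨kt - 1, by omega⟩
    simp [List.take_succ_cons]
  rw [hsel, hdrop]
  unfold pvSel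
  rw [show ((suf.length : Nat) : Int) - ((kt - 1 : Nat) : Int)
      = (((pre ++ v :: suf).length : Nat) : Int) - (kt : Int) - (i : Int) from by omega]

theorem pvMain (kt : Nat) : ∀ (bank : List Int) (tot : Int), 1 ≤ kt → kt ≤ bank.length →
    largest_joltage bank (kt : Int) tot = tot + pvHorner (pvSel bank kt) := by
  induction kt with
  | zero => intro bank tot h1 _; omega
  | succ kt ih =>
    intro bank tot h1 h2
    by_cases hk : kt = 0
    · -- base: k = 1
      subst hk
      rw [largest_joltage]
      rw [if_neg (by push_cast; omega), if_pos (by norm_num)]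
      obtain ⟨m, hm⟩ : ∃ m, PySem.List.max? bank (fun y => y) = some m := by
        cases h : PySem.List.max? bank (fun y => y) with
        | some m => exact ⟨m, rfl⟩
        | none =>
          have : bank = [] := (PySem.List.max?_eq_none_iff _ _).mp h
          simp [this] at h2
      have hmem : m ∈ bank := PySem.List.max?_mem hm
      obtain ⟨i, hi⟩ : ∃ i, PySem.List.index? bank m = some i := by
        cases h : PySem.List.index? bank m with
        | some i => exact ⟨i, rfl⟩
        | none => exact absurd ((PySem.List.index?_eq_none_iff _ _).mp h) (by simpa using hmem)
      simp only [hm]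
      have hv1 : PySem.List.max? (bank.take (bank.length - (1 - 1))) (fun y => y) = some m := by
        simpa [List.take_length] using hm
      obtain ⟨hsel, -⟩ := pvSel_step (le_refl 1) h2 hv1 hi
      rw [hsel]
      simp [pvSel, pvHorner]
    · -- step: k = kt + 1 ≥ 2
      have hkt1 : 1 ≤ kt := by omega
      rw [largest_joltage]
      rw [if_neg (by push_cast; omega), if_neg (by push_cast; omega)]
      have hslice : PySem.List.slice bank none (some (1 - ((kt + 1 : Nat) : Int)))
          = bank.take (bank.length - kt) := by
        rw [show (1 - ((kt + 1 : Nat) : Int)) = -(kt : Int) from by push_cast; ring]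
        exact PySem.List.slice_to_neg_natCast bank kt (by omega)
      rw [hslice]
      obtain ⟨v, hv⟩ : ∃ v, PySem.List.max? (bank.take (bank.length - kt)) (fun y => y) = some v := by
        cases h : PySem.List.max? (bank.take (bank.length - kt)) (fun y => y) with
        | some v => exact ⟨v, rfl⟩
        | none =>
          exfalso
          rcases List.take_eq_nil_iff.mp ((PySem.List.max?_eq_none_iff _ _).mp h) with h' | h'
          · omega
          · simp [h'] at h2
      have hvbank : v ∈ bank := List.take_subset _ _ (PySem.List.max?_mem hv)
      obtain ⟨i, hi⟩ : ∃ i, PySem.List.index? bank v = some i := by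
        cases h : PySem.List.index? bank v with
        | some i => exact ⟨i, rfl⟩
        | none => exact absurd ((PySem.List.index?_eq_none_iff _ _).mp h) (by simpa using hvbank)
      simp only [hv]
      have hv' : PySem.List.max? (bank.take (bank.length - (kt + 1 - 1))) (fun y => y) = some v := by
        simpa using hv
      obtain ⟨hsel, hile⟩ := pvSel_step (by omega) h2 hv' hi
      have hexp : (((kt + 1 : Nat) : Int) - 1).toNat = kt := by omega
      have hcast : ((kt + 1 : Nat) : Int) - 1 = (kt : Int) := by push_cast; ring
      rw [hexp, hcast]
      split
      · rename_i hnone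
        rw [hi] at hnone
        simp at hnone
      · rename_i i' hsome
        rw [hi] at hsome
        injection hsome with hii
        subst hii
        have hlen : kt ≤ (bank.drop (i + 1)).length := by
          simp only [List.length_drop]; omega
        rw [ih (bank.drop (i + 1)) (tot + v * 10 ^ kt) hkt1 hlen]
        have hsl : (pvSel (bank.drop (i + 1)) kt).length = kt := pvSel_len hkt1 hlen
        rw [hsel, show kt + 1 - 1 = kt from rfl, pvHorner_cons, hsl]
        ring

-- ===== VERDICT (by name: the statement is the Claim_ definition above) =====
theorem largest_joltage_spec : Claim_equal_largest_joltage := by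
  intro bank k tot _ hpre
  obtain ⟨hp1, hp2⟩ : 1 ≤ k ∧ k ≤ (bank.length : Int) := hpre
  unfold Spec_largest_joltage largest_joltage_alt
  have hk : ((k.toNat : Nat) : Int) = k := Int.toNat_of_nonneg (by omega)
  rw [if_neg (by omega), ← hk, pvMain k.toNat bank tot (by omega) (by omega)]
  simp only [PySem.List.slice_to _ (by omega : (0:Int) ≤ (k.toNat : Int))]
  simp [pvSel, pvHorner]
  rw [show max k 0 = k from by omega]
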